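-- pv_equiv track=rewrite | github.com/heewonp/Algorithm | python/programmers/N으로 표현.py | solution
-- ===== SOURCE A (Python) =====
-- def solution(N, number):
--     answer = -1
--     dp = []
--
--     for i in range(1,9):
--         num = set()
--         num.add(int(str(N)*i))
--
--         for j in range(0,i-1):
--             for x in dp[j]:
--                 for y in dp[-j-1]:
--                     num.add(x+y)
--                     num.add(x-y)
--                     num.add(x * y)
--
--                     if y != 0:
--                         num.add(x//y)
--
--         if number in num:
--             answer = i
--             break
--
--         dp.append(num)
--
--     return answer
-- ===== SOURCE B (Python) =====
-- def solution(N, number):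
--     memo = {}
--
--     def combine(xs, ys, s):
--         for x in xs:
--             for y in ys:
--                 s.add(x + y)
--                 s.add(x - y)
--                 s.add(x * y)
--                 if y != 0:
--                     s.add(x // y)
--         return s
--
--     def reachable(k):
--         if k in memo:
--             return memo[k]
--         s = {int(str(N) * k)}
--         for a in range(1, k):
--             s = combine(reachable(a), reachable(k - a), s)
--         memo[k] = s
--         return s
--
--     for k in range(1, 9):
--         if number in reachable(k):
--             return k
--     return -1
-- ===== Notes on version B (the rewrite author's own statement) =====
-- stated objective: alternative
-- what changed: Replaces the bottom-up dp list with negative-index lookups by a memoized recursive helper reachable(k) that returns the set of numbers formable from exactly k copies of N; solution then scans k = 1..8 for the first k whose set contains number.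
import Mathlib
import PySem

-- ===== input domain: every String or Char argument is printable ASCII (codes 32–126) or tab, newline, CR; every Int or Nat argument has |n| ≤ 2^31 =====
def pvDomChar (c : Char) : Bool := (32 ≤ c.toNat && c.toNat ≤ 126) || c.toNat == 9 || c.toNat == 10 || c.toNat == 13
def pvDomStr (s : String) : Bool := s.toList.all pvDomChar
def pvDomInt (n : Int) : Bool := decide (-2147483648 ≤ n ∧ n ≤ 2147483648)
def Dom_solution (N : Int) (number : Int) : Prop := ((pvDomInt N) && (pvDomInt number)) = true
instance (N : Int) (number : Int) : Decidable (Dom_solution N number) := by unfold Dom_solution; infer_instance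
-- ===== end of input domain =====

-- B re-implements the same bottom-up dp as a memoized recursion reachable(k) (alternative decomposition); return values agree on Pre_.

-- ===== PORT A =====
-- num = set() seeded with int(str(N)*i), then the three nested loops over j / dp[j] / dp[-j-1].
-- int(str(N)*i) is ported as ofChars? of pyRepeat; .getD 0 is reached only where Python raises ValueError (excluded by Pre_);
-- dp[j] and dp[-j-1] are always in range in Python, so .getD of an empty set is never the taken branch.
-- The Python sets are consumed only through membership and set-building (never through their iteration order),
-- so they are ported as Std.HashSet Int; the loops over them become HashSet.fold.
def aNum (N : Int) (i : Int) (dp : List (Std.HashSet Int)) : Std.HashSet Int :=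
  (PySem.List.pyRange 0 (i-1) 1).foldl (fun num j =>
    ((PySem.List.pyGet? dp j).getD Std.HashSet.emptyWithCapacity).fold (fun num x =>
      ((PySem.List.pyGet? dp (-j-1)).getD Std.HashSet.emptyWithCapacity).fold (fun num y =>
        let num := num.insert (x+y)
        let num := num.insert (x-y)
        let num := num.insert (x*y)
        if y ≠ 0 then num.insert (PySem.Int.floordiv x y) else num) num) num)
    (Std.HashSet.emptyWithCapacity.insert ((PySem.Int.ofChars? (PySem.List.pyRepeat (PySem.Int.toChars N) i)).getD 0))

-- the 'for i in range(1,9)' loop: answer = -1 unless the break fires, dp.append(num) otherwise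
def aLoop (N : Int) (number : Int) : List (Std.HashSet Int) → List Int → Int
  | _, [] => -1
  | dp, i :: rest =>
    let num := aNum N i dp
    if number ∈ num then i else aLoop N number (dp ++ [num]) rest

def solution (N : Int) (number : Int) : Int :=
  aLoop N number [] (PySem.List.pyRange 1 9 1)

-- ===== PORT B =====
-- reachable(k): seed {int(str(N)*k)}, then for a in range(1,k) combine reachable(a) with reachable(k-a).
-- (Source B's memo dict is pure caching; the recursion computes the same sets, so the port is the plain recursion.)
-- the two inner 'for x in reachable(a): for y in reachable(k-a):' loops of Source B
def bCombine (xs ys : Std.HashSet Int) (s : Std.HashSet Int) : Std.HashSet Int :=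
  xs.fold (fun s x =>
    ys.fold (fun s y =>
      let s := s.insert (x+y)
      let s := s.insert (x-y)
      let s := s.insert (x*y)
      if y ≠ 0 then s.insert (PySem.Int.floordiv x y) else s) s) s

def bReach (N : Int) : Nat → Std.HashSet Int
  | k =>
    (List.range (k-1)).attach.foldl (fun s a =>
      bCombine (bReach N (a.1+1)) (bReach N (k-(a.1+1))) s)
      (Std.HashSet.emptyWithCapacity.insert ((PySem.Int.ofChars? (PySem.List.pyRepeat (PySem.Int.toChars N) (k:Int))).getD 0))
  termination_by k => k
  decreasing_by
    · have := a.2; simp only [List.mem_range] at this; omega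
    · have := a.2; simp only [List.mem_range] at this; omega

-- the 'for k in range(1, 9): if number in reachable(k): return k' loop, then -1
def bLoop (N : Int) (number : Int) (k : Nat) : Int :=
  if k ≤ 8 then (if number ∈ bReach N k then (k : Int) else bLoop N number (k+1)) else -1
  termination_by 9 - k

def solution_alt (N : Int) (number : Int) : Int :=
  bLoop N number 1

-- ===== PRECONDITION & SPEC =====
-- Pre_ excludes exactly the inputs on which Python A raises ValueError: for N < 0 with number ≠ N,
-- iteration i = 2 evaluates int(str(N)*2) on e.g. "-3-3" and raises (so does B); A returns on all other inputs.
def Pre_solution (N : Int) (number : Int) : Prop := 0 ≤ N ∨ number = N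
instance (N : Int) (number : Int) : Decidable (Pre_solution N number) := by unfold Pre_solution; infer_instance
def pvWitness_solution : Int × Int := (5, 12)

def Spec_solution (N : Int) (number : Int) (out : Int) : Prop := out = solution_alt N number
instance (N : Int) (number : Int) (out : Int) : Decidable (Spec_solution N number out) := by unfold Spec_solution; infer_instance

-- ===== CLAIM (what is proved, stated in full; the proofs are below) =====
def Claim_equal_solution : Prop := ∀ (N : Int) (number : Int), Dom_solution N number → Pre_solution N number → Spec_solution N number (solution N number)

-- ===== LEMMAS AND PROOFS =====

-- indexing a map-of-range dp from the front (dp[j]) and from the back (dp[-j-1])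
lemma pyGet?_map_range_pos {α : Type} (f : Nat → α) (m j : Nat) (h : j < m) :
    PySem.List.pyGet? ((List.range m).map f) (j:Int) = some (f j) := by
  rw [PySem.List.pyGet?_ofNat _ j (by simp [h])]
  simp

lemma pyGet?_map_range_neg {α : Type} (f : Nat → α) (m j : Nat) (h : j < m) :
    PySem.List.pyGet? ((List.range m).map f) (-(j:Int)-1) = some (f (m-1-j)) := by
  simp only [PySem.List.pyGet?, PySem.List.pyIdx?, List.length_map, List.length_range]
  rw [if_neg (by omega), if_pos (by omega)]
  simp only [Option.bind_some, List.getElem?_map]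
  have : m - (-(-(j:Int)-1)).toNat = m - 1 - j := by omega
  rw [this, List.getElem?_range (by omega : m - 1 - j < m)]
  rfl

-- one step: A's num built from dp = [reachable 1, …, reachable (k-1)] IS reachable k
lemma aNum_eq_bReach (N : Int) (k : Nat) (hk : 1 ≤ k) :
    aNum N (k:Int) ((List.range (k-1)).map (fun t => bReach N (t+1))) = bReach N k := by
  conv_rhs => rw [bReach]
  rw [List.foldl_attach (f := fun s a => bCombine (bReach N (a+1)) (bReach N (k-(a+1))) s)]
  unfold aNum
  have hcast : (k:Int) - 1 = ((k-1 : Nat) : Int) := by omega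
  rw [hcast, PySem.List.pyRange_zero_nat, List.foldl_map]
  refine PySem.List.foldl_congr_mem _ _ _ _ ?_
  intro acc j hj
  simp only [List.mem_range] at hj
  rw [pyGet?_map_range_pos _ _ _ hj, pyGet?_map_range_neg _ _ _ hj]
  simp only [Option.getD_some]
  have h1 : k - 1 - 1 - j + 1 = k - (j+1) := by omega
  rw [h1]
  rfl

-- the two top-level loops agree, by induction on the remaining iterations
lemma loop_eq (N number : Int) : ∀ (n k : Nat), 1 ≤ k → k + n = 9 →
    aLoop N number ((List.range (k-1)).map (fun t => bReach N (t+1))) (PySem.List.pyRange (k:Int) 9 1) = bLoop N number k := by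
  intro n
  induction n with
  | zero =>
    intro k h1 h2
    have hk : k = 9 := by omega
    subst hk
    rw [PySem.List.pyRange_one_eq_nil (by norm_num), bLoop]
    simp [aLoop]
  | succ n ih =>
    intro k h1 h2
    rw [PySem.List.pyRange_one_cons (by exact_mod_cast by omega : (k:Int) < 9)]
    simp only [aLoop]
    rw [aNum_eq_bReach N k h1, bLoop, if_pos (by omega : k ≤ 8)]
    by_cases h : number ∈ bReach N k
    · simp only [if_pos h]
    · rw [if_neg h, if_neg h]
      have hdp : ((List.range (k-1)).map (fun t => bReach N (t+1))) ++ [bReach N k]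
          = (List.range ((k+1)-1)).map (fun t => bReach N (t+1)) := by
        have : (k+1)-1 = (k-1)+1 := by omega
        rw [this, List.range_succ, List.map_append]
        simp only [List.map_cons, List.map_nil]
        have : k - 1 + 1 = k := by omega
        rw [this]
      have hc : (k:Int) + 1 = ((k+1 : Nat) : Int) := by push_cast; ring
      rw [hdp, hc]
      exact ih (k+1) (by omega) (by omega)

-- ===== VERDICT (by name: the statement is the Claim_ definition above) =====
theorem solution_spec : Claim_equal_solution := by
  intro N number _ _
  unfold Spec_solution solution solution_alt
  have := loop_eq N number 8 1 (by norm_num) (by norm_num)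
  simpa using this
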